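-- pv_equiv track=rewrite | github.com/sparthaje/collaborative-manipulation | scripts/augment_episodes.py | ensure_min_intermediate_frames
-- ===== SOURCE A (Python) =====
-- MIN_INTERMEDIATE_FRAMES = 4  # minimum 4fps frames of holding/releasing
--
-- def ensure_min_intermediate_frames(
--     stages_4fps: list[str],
--     intermediate_label: str,
--     min_frames: int = MIN_INTERMEDIATE_FRAMES,
-- ) -> list[str]:
--     """Ensure at least *min_frames* of the intermediate stage between reaching and disengaging.
--
--     At 4 FPS the holding/releasing stage can be very short or absent entirely.
--     This backfills preceding "reaching" frames with *intermediate_label* so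
--     there are at least *min_frames* of that stage in the 4 FPS sequence.
--     """
--     result = list(stages_4fps)
--
--     count = result.count(intermediate_label)
--     if count >= min_frames:
--         return result
--
--     # Find the first frame that is either the intermediate or disengaging
--     # — this marks the transition boundary after reaching.
--     first_transition = None
--     for i, s in enumerate(result):
--         if s == intermediate_label or s == "disengaging":
--             first_transition = i
--             break
--
--     if first_transition is None:
--         return result  # arm never progressed past reaching
--
--     needed = min_frames - count
--     for i in range(first_transition - 1, -1, -1):
--         if needed <= 0:
--             break
--         if result[i] == "reaching":
--             result[i] = intermediate_label
--             needed -= 1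
--
--     return result
-- ===== SOURCE B (Python) =====
-- MIN_INTERMEDIATE_FRAMES = 4
--
-- def ensure_min_intermediate_frames(stages_4fps, intermediate_label, min_frames=MIN_INTERMEDIATE_FRAMES):
--     count = stages_4fps.count(intermediate_label)
--     if count >= min_frames:
--         return list(stages_4fps)
--
--     try:
--         first_transition = min(
--             i for i, s in enumerate(stages_4fps)
--             if s == intermediate_label or s == "disengaging")
--     except ValueError:
--         return list(stages_4fps)
--
--     prefix = stages_4fps[:first_transition]
--     # Rebuild the prefix: keep the first `skip` reaching frames, relabel the rest.
--     skip = prefix.count("reaching") - (min_frames - count)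
--     out = []
--     for s in prefix:
--         if s == "reaching":
--             if skip > 0:
--                 skip -= 1
--                 out.append(s)
--             else:
--                 out.append(intermediate_label)
--         else:
--             out.append(s)
--     return out + stages_4fps[first_transition:]
-- ===== Notes on version B (the rewrite author's own statement) =====
-- stated objective: alternative
-- what changed: A mutates a copy in place by walking indices backward from the transition, decrementing a needed counter with an early break; B never touches indices: it rebuilds the prefix functionally in a single forward pass, computing up front how many leading reaching frames to keep (prefix.count('reaching') - needed) and relabelling every reaching frame after that skip budget is spent, then concatenates the untouched suffix.
import Mathlib
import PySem

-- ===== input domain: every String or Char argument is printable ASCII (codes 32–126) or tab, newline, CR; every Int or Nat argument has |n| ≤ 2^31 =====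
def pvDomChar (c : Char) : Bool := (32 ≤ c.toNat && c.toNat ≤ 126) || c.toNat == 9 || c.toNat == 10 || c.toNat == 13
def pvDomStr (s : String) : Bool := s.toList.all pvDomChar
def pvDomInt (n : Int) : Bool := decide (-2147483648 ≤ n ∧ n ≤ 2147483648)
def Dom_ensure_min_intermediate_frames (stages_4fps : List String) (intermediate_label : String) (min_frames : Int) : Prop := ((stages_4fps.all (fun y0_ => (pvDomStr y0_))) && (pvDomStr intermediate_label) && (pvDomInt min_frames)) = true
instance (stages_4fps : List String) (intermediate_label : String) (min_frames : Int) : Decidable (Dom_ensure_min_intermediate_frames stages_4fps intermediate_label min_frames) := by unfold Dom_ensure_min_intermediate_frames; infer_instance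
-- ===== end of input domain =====

-- B replaces A's in-place backward index walk (mutate a copy while decrementing a
-- `needed` counter with an early break) by a purely functional forward rebuild: it
-- computes up front how many leading "reaching" frames of the prefix to KEEP
-- (prefix.count("reaching") - needed), rebuilds the prefix in one forward pass
-- relabelling every "reaching" frame once that skip budget is spent, and
-- concatenates the untouched suffix. Objective: alternative decomposition, same cost.

-- ===== PORT A =====
-- the enumerate loop with break: first index whose stage is the label or "disengaging"
def pvFirstTransA (label : String) : List String → Int → Option Int
  | [], _ => none
  | s :: rest, i =>
    if s == label || s == "disengaging" then some i
    else pvFirstTransA label rest (i + 1)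

-- the backward for-loop: walk range(first_transition-1,-1,-1); `needed <= 0` is the break.
-- pyGetD/pySetD with default are exact here: every index is in [0, first_transition) ⊆ [0, len).
def pvBackfill (label : String) : List Int → List String → Int → List String × Int
  | [], res, needed => (res, needed)
  | i :: is, res, needed =>
    if needed ≤ 0 then (res, needed)
    else if PySem.List.pyGetD res i "" == "reaching" then
      pvBackfill label is (PySem.List.pySetD res i label) (needed - 1)
    else
      pvBackfill label is res needed

def ensure_min_intermediate_frames (stages_4fps : List String) (intermediate_label : String) (min_frames : Int) : List String :=
  let result := stages_4fps
  let count : Int := (PySem.List.count result intermediate_label : Int)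
  if min_frames ≤ count then result
  else
    match pvFirstTransA intermediate_label result 0 with
    | none => result
    | some first_transition =>
      let needed := min_frames - count
      (pvBackfill intermediate_label
        (PySem.List.pyRange (first_transition - 1) (-1) (-1)) result needed).1

-- ===== PORT B =====
-- min(i for i, s in enumerate(stages_4fps) if …); the try/except ValueError is the none case
def pvFirstTransB (label : String) (res : List String) : Option Int :=
  PySem.List.min?
    (((PySem.List.enumerate res 0).filter (fun p => p.2 == label || p.2 == "disengaging")).map (·.1))
    (fun x => x)

def ensure_min_intermediate_frames_alt (stages_4fps : List String) (intermediate_label : String) (min_frames : Int) : List String :=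
  let count : Int := (PySem.List.count stages_4fps intermediate_label : Int)
  if min_frames ≤ count then stages_4fps
  else
    match pvFirstTransB intermediate_label stages_4fps with
    | none => stages_4fps
    | some first_transition =>
      let pre := PySem.List.slice stages_4fps none (some first_transition)
      let skip0 : Int := (PySem.List.count pre "reaching" : Int) - (min_frames - count)
      let out := (pre.foldl
        (fun (acc : List String × Int) s =>
          if s == "reaching" then
            if 0 < acc.2 then (acc.1 ++ [s], acc.2 - 1) else (acc.1 ++ [intermediate_label], acc.2)
          else (acc.1 ++ [s], acc.2))
        ([], skip0)).1
      out ++ PySem.List.slice stages_4fps (some first_transition) none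

-- ===== PRECONDITION & SPEC =====
def Spec_ensure_min_intermediate_frames (stages_4fps : List String) (intermediate_label : String) (min_frames : Int) (out : List String) : Prop := out = ensure_min_intermediate_frames_alt stages_4fps intermediate_label min_frames
instance (stages_4fps : List String) (intermediate_label : String) (min_frames : Int) (out : List String) : Decidable (Spec_ensure_min_intermediate_frames stages_4fps intermediate_label min_frames out) := by unfold Spec_ensure_min_intermediate_frames; infer_instance

-- ===== CLAIM (what is proved, stated in full; the proofs are below) =====
def Claim_equal_ensure_min_intermediate_frames : Prop := ∀ (stages_4fps : List String) (intermediate_label : String) (min_frames : Int), Dom_ensure_min_intermediate_frames stages_4fps intermediate_label min_frames → Spec_ensure_min_intermediate_frames stages_4fps intermediate_label min_frames (ensure_min_intermediate_frames stages_4fps intermediate_label min_frames)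

-- ===== LEMMAS AND PROOFS =====

-- ---- the two first-transition searches agree ----
theorem pvFoldlMin_of_le (t : List Int) (x : Int) (h : ∀ y ∈ t, x ≤ y) : t.foldl min x = x := by
  induction t generalizing x with
  | nil => rfl
  | cons y ys ih =>
    simp only [List.foldl_cons]
    rw [min_eq_left (h y (by simp))]
    exact ih x (fun z hz => h z (by simp [hz]))

theorem pvFirstTrans_eq (label : String) (l : List String) : ∀ start : Int,
    PySem.List.min?
        (((PySem.List.enumerate l start).filter (fun p => p.2 == label || p.2 == "disengaging")).map (·.1))
        (fun x => x)
      = pvFirstTransA label l start := by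
  induction l with
  | nil => intro start; simp [pvFirstTransA, PySem.List.enumerate_nil, PySem.List.min?]
  | cons s rest ih =>
    intro start
    rw [PySem.List.enumerate_cons]
    by_cases h : (s == label || s == "disengaging") = true
    · simp only [List.filter_cons, h, if_pos, List.map_cons]
      rw [PySem.List.min?_id_cons]
      rw [pvFoldlMin_of_le _ start ?_]
      · simp [pvFirstTransA, h]
      · intro y hy
        obtain ⟨p, hp, rfl⟩ := List.mem_map.mp hy
        obtain ⟨k, _, rfl⟩ := (PySem.List.mem_enumerate_iff _ _ _).mp (List.mem_of_mem_filter hp)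
        omega
    · have h2 : (s == label || s == "disengaging") = false := by simpa using h
      simp only [List.filter_cons, h2, if_neg, Bool.false_eq_true, not_false_iff]
      rw [ih (start + 1)]
      simp [pvFirstTransA, h2]

-- the found index is within the list
theorem pvFirstTransA_bound (label : String) (l : List String) : ∀ (s i : Int),
    pvFirstTransA label l s = some i → s ≤ i ∧ i < s + l.length := by
  induction l with
  | nil => intro s i h; simp [pvFirstTransA] at h
  | cons x t ih =>
    intro s i h
    by_cases hc : (x == label || x == "disengaging") = true
    · simp [pvFirstTransA, hc] at h
      simp [← h, List.length_cons]
    · have hc2 : (x == label || x == "disengaging") = false := by simpa using hc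
      rw [show pvFirstTransA label (x :: t) s = pvFirstTransA label t (s + 1) from by
        simp [pvFirstTransA, hc2]] at h
      have := ih (s + 1) i h
      simp only [List.length_cons]
      push_cast
      omega

-- ---- A-side: the counted backward scan reduces to a forward fold over dropped indices ----

-- reading at a nonneg index is unaffected by a set at a different nonneg index
theorem pvGetD_set_ne (res : List String) (i j : Int) (v d : String)
    (hi : 0 ≤ i) (hj : 0 ≤ j) (hne : i ≠ j) :
    PySem.List.pyGetD (res.set i.toNat v) j d = PySem.List.pyGetD res j d := by
  have hne' : i.toNat ≠ j.toNat := fun h => hne (by omega)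
  simp only [PySem.List.pyGetD, PySem.List.pyGet?, PySem.List.pyIdx?, List.length_set]
  split_ifs <;> simp [List.getElem?_set_ne hne']

-- Python's take-at-most-n (the budget `needed`), over Int
def pvTake : Int → List Int → List Int
  | _, [] => []
  | n, i :: is => if n ≤ 0 then [] else i :: pvTake (n - 1) is

theorem pvTake_nonpos (n : Int) (l : List Int) (h : n ≤ 0) : pvTake n l = [] := by
  cases l <;> simp [pvTake, h]

theorem pvTake_eq_take (n : Int) (l : List Int) (h : 0 ≤ n) : pvTake n l = l.take n.toNat := by
  induction l generalizing n with
  | nil => simp [pvTake]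
  | cons i is ih =>
    by_cases hn : n ≤ 0
    · have : n = 0 := le_antisymm hn h
      simp [this, pvTake]
    · have h1 : (0:Int) ≤ n - 1 := by omega
      rw [show pvTake n (i :: is) = i :: pvTake (n - 1) is from by
        simp only [pvTake]; rw [if_neg hn]]
      rw [ih _ h1, show n.toNat = (n - 1).toNat + 1 from by omega, List.take_succ_cons]

-- the backward counted scan is: set-to-label over the first `needed` reaching indices
theorem pvBackfill_char (label : String) : ∀ (ds : List Int) (res : List String) (n : Int),
    (∀ i ∈ ds, 0 ≤ i) → ds.Nodup →
    (pvBackfill label ds res n).1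
      = (pvTake n (ds.filter (fun i => PySem.List.pyGetD res i "" == "reaching"))).foldl
          (fun r i => PySem.List.pySetD r i label) res := by
  intro ds
  induction ds with
  | nil => intro res n _ _; simp [pvBackfill, pvTake]
  | cons i is ih =>
    intro res n hpos hnd
    have hi : 0 ≤ i := hpos i (by simp)
    have hpos' : ∀ j ∈ is, 0 ≤ j := fun j hj => hpos j (by simp [hj])
    have hnd' : is.Nodup := hnd.of_cons
    by_cases hn : n ≤ 0
    · rw [show pvBackfill label (i :: is) res n = (res, n) from by
        simp only [pvBackfill]; rw [if_pos hn]]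
      rw [pvTake_nonpos _ _ hn]
      simp
    · by_cases ht : (PySem.List.pyGetD res i "" == "reaching") = true
      · have hres : PySem.List.pySetD res i label = res.set i.toNat label :=
          PySem.List.pySetD_of_nonneg res label hi
        have hfil : is.filter (fun j => PySem.List.pyGetD (PySem.List.pySetD res i label) j "" == "reaching")
            = is.filter (fun j => PySem.List.pyGetD res j "" == "reaching") := by
          apply List.filter_congr
          intro j hj
          have hji : i ≠ j := fun h => (List.nodup_cons.mp hnd).1 (h ▸ hj)
          rw [hres, pvGetD_set_ne res i j label "" hi (hpos' j hj) hji]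
        rw [show pvBackfill label (i :: is) res n
            = pvBackfill label is (PySem.List.pySetD res i label) (n - 1) from by
          simp only [pvBackfill]; rw [if_neg hn, if_pos ht]]
        rw [ih _ _ hpos' hnd', hfil]
        rw [show (i :: is).filter (fun i => PySem.List.pyGetD res i "" == "reaching")
            = i :: is.filter (fun i => PySem.List.pyGetD res i "" == "reaching") from by
          simp [ht]]
        rw [show pvTake n (i :: is.filter (fun i => PySem.List.pyGetD res i "" == "reaching"))
            = i :: pvTake (n - 1) (is.filter (fun i => PySem.List.pyGetD res i "" == "reaching")) from by
          simp only [pvTake]; rw [if_neg hn]]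
        rfl
      · rw [show pvBackfill label (i :: is) res n = pvBackfill label is res n from by
          simp only [pvBackfill]; rw [if_neg hn, if_neg ht]]
        rw [ih _ _ hpos' hnd']
        rw [show (i :: is).filter (fun i => PySem.List.pyGetD res i "" == "reaching")
            = is.filter (fun i => PySem.List.pyGetD res i "" == "reaching") from by
          simp [ht]]

-- sets to the same label at nonneg indices commute, so folding over the reverse is the same
theorem pvFold_comm (label : String) (r : List String) (i j : Int) :
    PySem.List.pySetD (PySem.List.pySetD r i label) j label
      = PySem.List.pySetD (PySem.List.pySetD r j label) i label := by
  have hD : ∀ (r' : List String) (k : Int), r'.length = r.length →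
      PySem.List.pySetD r' k label
        = ((PySem.List.pyIdx? r.length k).map (fun m => r'.set m label)).getD r' := by
    intro r' k h
    simp [PySem.List.pySetD, PySem.List.pySet?, h]
  have hli : (PySem.List.pySetD r i label).length = r.length := by
    rw [hD r i rfl]; cases PySem.List.pyIdx? r.length i <;> simp
  have hlj : (PySem.List.pySetD r j label).length = r.length := by
    rw [hD r j rfl]; cases PySem.List.pyIdx? r.length j <;> simp
  rw [hD _ j hli, hD _ i hlj, hD r i rfl, hD r j rfl]
  cases hpi : PySem.List.pyIdx? r.length i with
  | none => cases hpj : PySem.List.pyIdx? r.length j <;> simp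
  | some ki =>
    cases hpj : PySem.List.pyIdx? r.length j with
    | none => simp
    | some kj =>
      simp only [Option.map_some, Option.getD_some]
      by_cases h : ki = kj
      · rw [h]
      · exact List.set_comm _ _ h

theorem pvFold_pull (label : String) : ∀ (l : List Int) (r : List String) (i : Int),
    PySem.List.pySetD (l.foldl (fun r k => PySem.List.pySetD r k label) r) i label
      = l.foldl (fun r k => PySem.List.pySetD r k label) (PySem.List.pySetD r i label) := by
  intro l
  induction l with
  | nil => intro r i; rfl
  | cons k t ih =>
    intro r i
    simp only [List.foldl_cons]
    rw [ih, pvFold_comm]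

theorem pvFold_reverse (label : String) : ∀ (l : List Int) (r : List String),
    l.reverse.foldl (fun r k => PySem.List.pySetD r k label) r
      = l.foldl (fun r k => PySem.List.pySetD r k label) r := by
  intro l
  induction l with
  | nil => intro r; rfl
  | cons k t ih =>
    intro r
    simp only [List.reverse_cons, List.foldl_append, List.foldl_cons, List.foldl_nil]
    rw [ih, ← pvFold_pull]

-- ---- the common skeleton: keep the first m reaching frames, relabel the rest ----
def pvMarkN (label : String) : List String → Nat → List String
  | [], _ => []
  | s :: t, m =>
    if s == "reaching" then
      match m with
      | 0 => label :: pvMarkN label t 0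
      | m' + 1 => s :: pvMarkN label t m'
    else s :: pvMarkN label t m

-- shifting all indices by one skips the head
theorem pvFoldSet_shift (label : String) : ∀ (J : List Nat) (x : String) (xs : List String),
    (J.map (· + 1)).foldl (fun r j => r.set j label) (x :: xs)
      = x :: J.foldl (fun r j => r.set j label) xs := by
  intro J
  induction J with
  | nil => intro x xs; rfl
  | cons j t ih =>
    intro x xs
    simp only [List.map_cons, List.foldl_cons, List.set_cons_succ]
    exact ih x _

-- A's fold over the trailing reaching indices is the forward mark with m kept
theorem pvFoldSet_drop_eq_markN (label : String) : ∀ (l suf : List String) (m : Nat),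
    ((((List.range l.length).filter (fun j => (l ++ suf).getD j "" == "reaching")).drop m).foldl
        (fun r j => r.set j label) (l ++ suf))
      = pvMarkN label l m ++ suf := by
  intro l
  induction l with
  | nil => intro suf m; simp [pvMarkN]
  | cons s t ih =>
    intro suf m
    have hshift : ∀ (J : List Nat) (x : String) (m' : Nat),
        ((J.map (· + 1)).drop m').foldl (fun r j => r.set j label) (x :: (t ++ suf))
          = x :: (J.drop m').foldl (fun r j => r.set j label) (t ++ suf) := by
      intro J x m'
      rw [← List.map_drop, pvFoldSet_shift]
    have hfil : ((List.range (s :: t).length).filter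
          (fun j => (s :: (t ++ suf)).getD j "" == "reaching"))
        = (if s == "reaching" then [0] else [])
          ++ ((List.range t.length).filter (fun j => (t ++ suf).getD j "" == "reaching")).map (· + 1) := by
      rw [List.length_cons, List.range_succ_eq_map, List.filter_cons]
      rw [show List.map Nat.succ (List.range t.length) = (List.range t.length).map (· + 1) from by
        simp]
      rw [List.filter_map]
      have he : ((fun j => (s :: (t ++ suf)).getD j "" == "reaching") ∘ (· + 1))
          = fun j => (t ++ suf).getD j "" == "reaching" := by
        funext j; simp
      rw [he]
      by_cases hs : (s == "reaching") = true
      · simp [hs]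
      · have hs2 : (s == "reaching") = false := by simpa using hs
        simp [hs2]
    rw [show (s :: t) ++ suf = s :: (t ++ suf) from rfl, hfil]
    by_cases hs : (s == "reaching") = true
    · rw [if_pos hs]
      cases m with
      | zero =>
        simp only [List.singleton_append, List.drop_zero, List.foldl_cons, List.set_cons_zero]
        rw [show ((List.range t.length).filter (fun j => (t ++ suf).getD j "" == "reaching")).map (· + 1)
            = (((List.range t.length).filter (fun j => (t ++ suf).getD j "" == "reaching")).map (· + 1)).drop 0 from rfl]
        rw [hshift, ih suf 0]
        simp [pvMarkN, hs]
      | succ m' =>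
        simp only [List.singleton_append, List.drop_succ_cons]
        rw [hshift, ih suf m']
        simp [pvMarkN, hs]
    · have hs2 : (s == "reaching") = false := by simpa using hs
      rw [if_neg (by simp [hs2])]
      simp only [List.nil_append]
      rw [hshift, ih suf m]
      simp [pvMarkN, hs2]

-- count of reaching in the prefix = number of reaching indices
theorem pvCount_filter_range : ∀ (l suf : List String),
    ((List.range l.length).filter (fun j => (l ++ suf).getD j "" == "reaching")).length
      = l.count "reaching" := by
  intro l
  induction l with
  | nil => intro suf; simp
  | cons s t ih =>
    intro suf
    rw [show (s :: t) ++ suf = s :: (t ++ suf) from rfl]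
    rw [List.length_cons, List.range_succ_eq_map, List.filter_cons]
    rw [show List.map Nat.succ (List.range t.length) = (List.range t.length).map (· + 1) from by
      simp]
    rw [List.filter_map]
    have he : ((fun j => (s :: (t ++ suf)).getD j "" == "reaching") ∘ (· + 1))
        = fun j => (t ++ suf).getD j "" == "reaching" := by
      funext j; simp
    rw [he]
    by_cases hs : (s == "reaching") = true
    · have hs' : ((s :: (t ++ suf)).getD 0 "" == "reaching") = true := by
        simpa [List.getD_cons_zero] using hs
      rw [if_pos hs']
      simp only [List.length_cons, List.length_map, ih suf]
      simp [show s = "reaching" from by simpa using hs]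
    · have hs2 : (s == "reaching") = false := by simpa using hs
      rw [if_neg (by simp [hs2])]
      simp only [List.length_map, ih suf]
      simp [List.count_cons, hs2]

-- B's forward fold is the Int-budget mark
def pvMarkI (label : String) : List String → Int → List String
  | [], _ => []
  | s :: t, k =>
    if s == "reaching" then
      if 0 < k then s :: pvMarkI label t (k - 1) else label :: pvMarkI label t k
    else s :: pvMarkI label t k

theorem pvFoldB_char (label : String) : ∀ (l : List String) (acc : List String) (k : Int),
    (l.foldl
        (fun (acc : List String × Int) s =>
          if s == "reaching" then
            if 0 < acc.2 then (acc.1 ++ [s], acc.2 - 1) else (acc.1 ++ [label], acc.2)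
          else (acc.1 ++ [s], acc.2))
        (acc, k)).1
      = acc ++ pvMarkI label l k := by
  intro l
  induction l with
  | nil => intro acc k; simp [pvMarkI]
  | cons s t ih =>
    intro acc k
    by_cases hs : (s == "reaching") = true
    · by_cases hk : (0:Int) < k
      · simp only [List.foldl_cons, hs, if_pos, hk]
        rw [ih]
        simp [pvMarkI, hs, hk]
      · simp only [List.foldl_cons, hs, if_pos, hk, if_false]
        rw [ih]
        simp [pvMarkI, hs, hk]
    · have hs2 : (s == "reaching") = false := by simpa using hs
      simp only [List.foldl_cons, hs2, Bool.false_eq_true, if_false]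
      rw [ih]
      simp [pvMarkI, hs2]

theorem pvMarkI_eq_markN (label : String) : ∀ (l : List String) (k : Int),
    pvMarkI label l k = pvMarkN label l k.toNat := by
  intro l
  induction l with
  | nil => intro k; rfl
  | cons s t ih =>
    intro k
    by_cases hs : (s == "reaching") = true
    · by_cases hk : (0:Int) < k
      · have h1 : k.toNat = (k - 1).toNat + 1 := by omega
        rw [show pvMarkI label (s :: t) k = s :: pvMarkI label t (k - 1) from by
          simp [pvMarkI, hs, hk]]
        rw [h1, show pvMarkN label (s :: t) ((k - 1).toNat + 1) = s :: pvMarkN label t (k - 1).toNat from by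
          simp [pvMarkN, hs]]
        rw [ih]
      · have h0 : k.toNat = 0 := by omega
        rw [show pvMarkI label (s :: t) k = label :: pvMarkI label t k from by
          simp [pvMarkI, hs, hk]]
        rw [h0, show pvMarkN label (s :: t) 0 = label :: pvMarkN label t 0 from by
          simp [pvMarkN, hs]]
        rw [ih, h0]
    · have hs2 : (s == "reaching") = false := by simpa using hs
      simp [pvMarkI, pvMarkN, hs2, ih]

-- ===== VERDICT (by name: the statement is the Claim_ definition above) =====
theorem ensure_min_intermediate_frames_spec : Claim_equal_ensure_min_intermediate_frames := by
  intro stages label mf _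
  unfold Spec_ensure_min_intermediate_frames
  simp only [ensure_min_intermediate_frames, ensure_min_intermediate_frames_alt, pvFirstTransB]
  by_cases hc : mf ≤ ((PySem.List.count stages label : Nat) : Int)
  · rw [if_pos hc, if_pos hc]
  · rw [if_neg hc, if_neg hc]
    rw [pvFirstTrans_eq label stages 0]
    cases hft : pvFirstTransA label stages 0 with
    | none => rfl
    | some ft =>
      dsimp only
      obtain ⟨hft0, hftlen⟩ := pvFirstTransA_bound label stages 0 ft hft
      have hFlen : ft.toNat < stages.length := by omega
      have hftF : ft = ((ft.toNat : Nat) : Int) := by omega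
      obtain ⟨l, suf, hls, hlen⟩ : ∃ l suf, stages = l ++ suf ∧ l.length = ft.toNat :=
        ⟨_, _, (List.take_append_drop ft.toNat stages).symm,
          List.length_take_of_le (le_of_lt hFlen)⟩
      subst hls
      -- A side: unfold the backward counted scan into a forward fold over dropped indices
      have hrange : PySem.List.pyRange (ft - 1) (-1) (-1) = (PySem.List.pyRange 0 ft 1).reverse := by
        rw [PySem.List.pyRange_neg_one_eq_reverse]; norm_num
      rw [hrange]
      have hposas : ∀ i ∈ (PySem.List.pyRange 0 ft 1).reverse, 0 ≤ i := by
        intro i hi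
        rw [List.mem_reverse] at hi
        exact (PySem.List.mem_pyRange_one.mp hi).1
      have hndas : (PySem.List.pyRange 0 ft 1).reverse.Nodup :=
        List.nodup_reverse.mpr (PySem.List.nodup_pyRange_one 0 ft)
      rw [pvBackfill_char label _ _ _ hposas hndas]
      rw [List.filter_reverse]
      rw [pvTake_eq_take _ _ (by omega)]
      rw [List.take_reverse]
      rw [pvFold_reverse]
      rw [hftF, PySem.List.pyRange_zero_natCast, List.filter_map]
      have hcomp : ((fun i => PySem.List.pyGetD (l ++ suf) i "" == "reaching") ∘ (fun k : Nat => (k : Int)))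
          = fun j : Nat => (l ++ suf).getD j "" == "reaching" := by
        funext j
        simp [PySem.List.pyGetD_natCast]
      rw [hcomp, List.length_map, ← List.map_drop, List.foldl_map]
      simp only [PySem.List.pySetD_natCast]
      rw [show List.range ft.toNat = List.range l.length from by rw [hlen]]
      rw [pvFoldSet_drop_eq_markN]
      -- B side: the forward rebuild is the mark with the Int skip budget
      rw [PySem.List.slice_to_natCast, PySem.List.slice_from_natCast]
      rw [show (l ++ suf).take ft.toNat = l from by rw [← hlen]; exact List.take_left]
      rw [show (l ++ suf).drop ft.toNat = suf from by rw [← hlen]; exact List.drop_left]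
      rw [pvFoldB_char, List.nil_append, pvMarkI_eq_markN]
      -- the two kept counts coincide
      rw [pvCount_filter_range l suf]
      simp only [PySem.List.count_eq]
      have hc2 : ((List.count label (l ++ suf) : Nat) : Int) < mf := by
        rw [← PySem.List.count_eq]; omega
      have hm : List.count "reaching" l - (mf - ((List.count label (l ++ suf) : Nat) : Int)).toNat
          = ((List.count "reaching" l : Int) - (mf - ((List.count label (l ++ suf) : Nat) : Int))).toNat := by
        omega
      rw [hm]
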